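-- pv_equiv track=rewrite | github.com/maiziex/Aquila | bin/Run_h5_all_multithreads.py | get_match_num_revised
-- ===== SOURCE A (Python) =====
-- def get_match_num_revised(cigar):
--     cigar_len = len(cigar)
--     cigar_list = []
--     num_string = ""
--     for i in range(cigar_len):
--         letter = cigar[i]
--         if letter.isalpha():
--             cigar_list.append(num_string)
--             num_string = ""
--             cigar_list.append(letter)
--         else:
--             num_string += letter
--
--     indices = [i for i, x in enumerate(cigar_list) if x == "M"]
--     cumu_num = 0
--     cumu_start = 0
--     cumu_num_list = []
--     cumu_start_list = []
--     match_num_list = []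
--     for idx in indices:
--         match_num = int(cigar_list[idx - 1])
--         match_num_list.append(match_num)
--         for i in range(0,idx,1):
--             parameter = cigar_list[i+1]
--             if parameter in ["M", "S", "H", "I"]:
--                 cumu_num += int(cigar_list[i])
--             if parameter in ["M", "D"]:
--                 cumu_start += int(cigar_list[i])
--
--         cumu_num_list.append(cumu_num-match_num)
--         cumu_start_list.append(cumu_start-match_num)
--         cumu_num = 0
--         cumu_start = 0
--
--     return (cumu_num_list,cumu_start_list,match_num_list)
-- ===== SOURCE B (Python) =====
-- def get_match_num_revised(cigar):
--     # Tokenize: one pass, (number-string, op-letter) pairs; trailing digits dropped.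
--     tokens = []
--     num = ""
--     for ch in cigar:
--         if ch.isalpha():
--             tokens.append((num, ch))
--             num = ""
--         else:
--             num += ch
--     # Index of the last 'M' (nothing after it ever matters).
--     last = -1
--     for j, (_, op) in enumerate(tokens):
--         if op == "M":
--             last = j
--     cumu_num_list = []
--     cumu_start_list = []
--     match_num_list = []
--     cn = 0
--     cs = 0
--     for num_s, op in tokens[:last + 1]:
--         if op == "M":
--             n = int(num_s)
--             cumu_num_list.append(cn)
--             cumu_start_list.append(cs)
--             match_num_list.append(n)
--             cn += n
--             cs += n
--         elif op in ("S", "H", "I"):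
--             cn += int(num_s)
--         elif op == "D":
--             cs += int(num_s)
--     return (cumu_num_list, cumu_start_list, match_num_list)
-- ===== Notes on version B (the rewrite author's own statement) =====
-- stated objective: faster
-- what changed: A re-scans the whole parsed CIGAR list from index 0 for every match operation (O(N*M)); B tokenizes the string once into (count, op) pairs and keeps running cumulative sums in a single pass up to the last match operation, emitting each match entry as it goes (O(N)).
import Mathlib
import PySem

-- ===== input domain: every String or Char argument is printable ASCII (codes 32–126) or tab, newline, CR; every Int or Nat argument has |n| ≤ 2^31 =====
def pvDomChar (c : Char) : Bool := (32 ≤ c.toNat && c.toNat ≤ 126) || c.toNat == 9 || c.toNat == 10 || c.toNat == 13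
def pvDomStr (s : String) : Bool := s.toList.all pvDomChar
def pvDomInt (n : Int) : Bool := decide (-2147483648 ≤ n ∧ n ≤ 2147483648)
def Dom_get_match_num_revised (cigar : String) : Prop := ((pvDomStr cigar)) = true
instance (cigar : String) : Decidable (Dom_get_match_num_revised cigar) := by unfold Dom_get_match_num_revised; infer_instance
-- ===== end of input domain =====

-- B replaces A's per-'M' rescan of the whole parsed CIGAR (O(N·M)) by one tokenizing pass and one
-- running-prefix-sum pass (O(N)); equivalence of RETURN VALUES is proved on Pre_ (where Python A returns).

-- ===== PORT A =====
-- number chunks are kept as List Char (Python str); a letter entry of cigar_list is the singleton [letter]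
def pvA_tokStep (st : List (List Char) × List Char) (letter : Char) : List (List Char) × List Char :=
  if PySem.Chars.isalpha letter then (st.1 ++ [st.2, [letter]], []) else (st.1, st.2 ++ [letter])

def pvA_innerStep (cigar_list : List (List Char)) (ac : Int × Int) (i : Int) : Int × Int :=
  let parameter := PySem.List.pyGetD cigar_list (i + 1) []
  ((if parameter == ['M'] || parameter == ['S'] || parameter == ['H'] || parameter == ['I'] then
      ac.1 + (PySem.Int.ofChars? (PySem.List.pyGetD cigar_list i [])).getD 0
    else ac.1),
   (if parameter == ['M'] || parameter == ['D'] then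
      ac.2 + (PySem.Int.ofChars? (PySem.List.pyGetD cigar_list i [])).getD 0
    else ac.2))

def pvA_outerStep (cigar_list : List (List Char)) (st : Int × Int × List Int × List Int × List Int)
    (idx : Int) : Int × Int × List Int × List Int × List Int :=
  let match_num := (PySem.Int.ofChars? (PySem.List.pyGetD cigar_list (idx - 1) [])).getD 0
  let inner := (PySem.List.pyRange 0 idx 1).foldl (pvA_innerStep cigar_list) (st.1, st.2.1)
  (0, 0, st.2.2.1 ++ [inner.1 - match_num], st.2.2.2.1 ++ [inner.2 - match_num],
   st.2.2.2.2 ++ [match_num])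

def get_match_num_revised (cigar : String) : List Int × List Int × List Int :=
  let st := cigar.toList.foldl pvA_tokStep ([], [])
  let cigar_list := st.1
  let indices := ((PySem.List.enumerate cigar_list 0).filter (fun q => q.2 == ['M'])).map (·.1)
  let r := indices.foldl (pvA_outerStep cigar_list) (0, 0, [], [], [])
  r.2.2

-- ===== PORT B =====
def pvB_tokStep (st : List (List Char × Char) × List Char) (ch : Char) :
    List (List Char × Char) × List Char :=
  if PySem.Chars.isalpha ch then (st.1 ++ [(st.2, ch)], []) else (st.1, st.2 ++ [ch])

def pvB_lastStep (last : Int) (q : Int × (List Char × Char)) : Int :=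
  if q.2.2 == 'M' then q.1 else last

def pvB_mainStep (st : Int × Int × List Int × List Int × List Int) (p : List Char × Char) :
    Int × Int × List Int × List Int × List Int :=
  if p.2 == 'M' then
    let n := (PySem.Int.ofChars? p.1).getD 0
    (st.1 + n, st.2.1 + n, st.2.2.1 ++ [st.1], st.2.2.2.1 ++ [st.2.1], st.2.2.2.2 ++ [n])
  else if p.2 == 'S' || p.2 == 'H' || p.2 == 'I' then
    (st.1 + (PySem.Int.ofChars? p.1).getD 0, st.2)
  else if p.2 == 'D' then
    (st.1, st.2.1 + (PySem.Int.ofChars? p.1).getD 0, st.2.2)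
  else st

def get_match_num_revised_alt (cigar : String) : List Int × List Int × List Int :=
  let tp := cigar.toList.foldl pvB_tokStep ([], [])
  let tokens := tp.1
  let last := (PySem.List.enumerate tokens 0).foldl pvB_lastStep (-1)
  let r := (PySem.List.slice tokens none (some (last + 1))).foldl pvB_mainStep (0, 0, [], [], [])
  r.2.2

-- ===== PRECONDITION & SPEC =====
-- standalone tokenizer (used only by Pre_ and the proofs, by neither port): (number-chunk, letter) pairs
def pvTok : List Char → List Char → List (List Char × Char)
  | [], _ => []
  | c :: rest, num =>
    if PySem.Chars.isalpha c then (num, c) :: pvTok rest [] else pvTok rest (num ++ [c])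

-- Pre_ excludes exactly the inputs where Python A raises ValueError: a number chunk that int() cannot
-- parse, sitting before an operation letter in {M,S,H,I,D} that still has an 'M' at or after it.
def Pre_get_match_num_revised (cigar : String) : Prop :=
  ∀ j : Fin (pvTok cigar.toList []).length,
    ((pvTok cigar.toList []).get j).2 ∈ (['M', 'S', 'H', 'I', 'D'] : List Char) →
    (∃ k : Fin (pvTok cigar.toList []).length, j.val ≤ k.val ∧ ((pvTok cigar.toList []).get k).2 = 'M') →
    (PySem.Int.ofChars? ((pvTok cigar.toList []).get j).1).isSome = true
instance (cigar : String) : Decidable (Pre_get_match_num_revised cigar) := by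
  unfold Pre_get_match_num_revised; infer_instance

def pvWitness_get_match_num_revised : String := "3M12S4M"

def Spec_get_match_num_revised (cigar : String) (out : List Int × List Int × List Int) : Prop :=
  out = get_match_num_revised_alt cigar
instance (cigar : String) (out : List Int × List Int × List Int) :
    Decidable (Spec_get_match_num_revised cigar out) := by
  unfold Spec_get_match_num_revised; infer_instance

-- ===== CLAIM (what is proved, stated in full; the proofs are below) =====
def Claim_equal_get_match_num_revised : Prop :=
  ∀ (cigar : String), Dom_get_match_num_revised cigar → Pre_get_match_num_revised cigar →
    Spec_get_match_num_revised cigar (get_match_num_revised cigar)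

-- ===== LEMMAS AND PROOFS =====

-- proof-side vocabulary
def pvFlat (l : List (List Char × Char)) : List (List Char) :=
  l.flatMap (fun p => [p.1, [p.2]])

def pvVal (num : List Char) : Int := (PySem.Int.ofChars? num).getD 0

def pvIsN (op : Char) : Bool := op == 'M' || op == 'S' || op == 'H' || op == 'I'
def pvIsS (op : Char) : Bool := op == 'M' || op == 'D'

def pvSumN (l : List (List Char × Char)) : Int :=
  (l.map (fun p => if pvIsN p.2 then pvVal p.1 else 0)).sum
def pvSumS (l : List (List Char × Char)) : Int :=
  (l.map (fun p => if pvIsS p.2 then pvVal p.1 else 0)).sum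

-- positions of 'M' tokens
def pvMjs : List (List Char × Char) → List Nat
  | [] => []
  | p :: rest => if p.2 = 'M' then 0 :: (pvMjs rest).map (· + 1) else (pvMjs rest).map (· + 1)

-- no character of a number chunk is alphabetic
def pvNoAl (l : List (List Char × Char)) : Prop :=
  ∀ p ∈ l, ∀ c ∈ p.1, PySem.Chars.isalpha c = false

-- the common intermediate semantics: one prefix-sum pass over the token list
def pvSpec : List (List Char × Char) → Int → Int → List Int × List Int × List Int
  | [], _, _ => ([], [], [])
  | (num, op) :: rest, cn, cs =>
    let n := pvVal num
    let r := pvSpec rest (if pvIsN op then cn + n else cn) (if pvIsS op then cs + n else cs)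
    if op = 'M' then (cn :: r.1, cs :: r.2.1, n :: r.2.2) else r

theorem pvB_tok_eq (cs : List Char) : ∀ acc num,
    (cs.foldl pvB_tokStep (acc, num)).1 = acc ++ pvTok cs num := by
  induction cs with
  | nil => intro acc num; simp [pvTok]
  | cons c rest ih =>
    intro acc num
    by_cases h : PySem.Chars.isalpha c
    · simp [pvB_tokStep, pvTok, h, ih]
    · simp [pvB_tokStep, pvTok, h, ih]

theorem pvA_tok_eq (cs : List Char) : ∀ acc num,
    (cs.foldl pvA_tokStep (acc, num)).1 = acc ++ pvFlat (pvTok cs num) := by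
  induction cs with
  | nil => intro acc num; simp [pvTok, pvFlat]
  | cons c rest ih =>
    intro acc num
    by_cases h : PySem.Chars.isalpha c
    · simp [pvA_tokStep, pvTok, pvFlat, h, ih]
    · simp [pvA_tokStep, pvTok, h, ih]

theorem pvTok_noAl (cs : List Char) : ∀ num, (∀ c ∈ num, PySem.Chars.isalpha c = false) →
    pvNoAl (pvTok cs num) := by
  induction cs with
  | nil => intro num h p hp; simp [pvTok] at hp
  | cons c rest ih =>
    intro num h
    by_cases hc : PySem.Chars.isalpha c
    · simp only [pvTok, hc, if_pos]
      intro p hp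
      rcases List.mem_cons.1 hp with h1 | h1
      · subst h1; exact h
      · exact ih [] (by simp) p h1
    · simp only [pvTok, hc, if_neg, Bool.false_eq_true, not_false_iff]
      exact ih (num ++ [c]) (by
        intro d hd
        rcases List.mem_append.1 hd with h1 | h1
        · exact h d h1
        · simp at h1; subst h1; simpa using hc)

theorem pvFlat_getD_even (l : List (List Char × Char)) : ∀ k : Nat, k < l.length →
    (pvFlat l).getD (2 * k) [] = (l.getD k ([], ' ')).1 := by
  induction l with
  | nil => intro k hk; simp at hk
  | cons p rest ih =>
    intro k hk
    cases k with
    | zero => simp [pvFlat]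
    | succ k =>
      have h2 : 2 * (k + 1) = (2 * k) + 1 + 1 := by ring
      simp only [pvFlat, List.flatMap_cons, h2, List.cons_append, List.nil_append,
        List.getD_cons_succ]
      exact ih k (by simpa using hk)

theorem pvFlat_getD_odd (l : List (List Char × Char)) : ∀ k : Nat, k < l.length →
    (pvFlat l).getD (2 * k + 1) [] = [(l.getD k ([], ' ')).2] := by
  induction l with
  | nil => intro k hk; simp at hk
  | cons p rest ih =>
    intro k hk
    cases k with
    | zero => simp [pvFlat]
    | succ k =>
      have h2 : 2 * (k + 1) + 1 = (2 * k + 1) + 1 + 1 := by ring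
      simp only [pvFlat, List.flatMap_cons, h2, List.cons_append, List.nil_append,
        List.getD_cons_succ]
      exact ih k (by simpa using hk)

theorem pvMjs_lt (l : List (List Char × Char)) : ∀ j ∈ pvMjs l, j < l.length ∧ (l.getD j ([], ' ')).2 = 'M' := by
  induction l with
  | nil => intro j hj; simp [pvMjs] at hj
  | cons p rest ih =>
    intro j hj
    by_cases hM : p.2 = 'M'
    · simp only [pvMjs, hM, if_pos] at hj
      rcases List.mem_cons.1 hj with h1 | h1
      · subst h1; simpa using hM
      · rcases List.mem_map.1 h1 with ⟨j', hj', rfl⟩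
        have := ih j' hj'
        exact ⟨by simpa using Nat.succ_lt_succ this.1, by simpa using this.2⟩
    · simp only [pvMjs, hM, if_neg, not_false_iff] at hj
      rcases List.mem_map.1 hj with ⟨j', hj', rfl⟩
      have := ih j' hj'
      exact ⟨by simpa using Nat.succ_lt_succ this.1, by simpa using this.2⟩

theorem pvIndices_eq (l : List (List Char × Char)) (hno : pvNoAl l) : ∀ s : Int,
    ((PySem.List.enumerate (pvFlat l) s).filter (fun q => q.2 == ['M'])).map (·.1)
      = (pvMjs l).map (fun (j : Nat) => s + 2 * (j : Int) + 1) := by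
  induction l with
  | nil => intro s; simp [pvFlat, pvMjs]
  | cons p rest ih =>
    intro s
    have hno' : pvNoAl rest := fun q hq => hno q (List.mem_cons_of_mem _ hq)
    have hnum : ¬ (p.1 == ['M']) = true := by
      intro h
      have : p.1 = ['M'] := by simpa using h
      have := hno p (List.mem_cons_self) 'M' (by simp [this])
      simp [show PySem.Chars.isalpha 'M' = true from by decide] at this
    have hflat : pvFlat (p :: rest) = p.1 :: [p.2] :: pvFlat rest := by simp [pvFlat]
    rw [hflat, PySem.List.enumerate_cons, PySem.List.enumerate_cons]
    by_cases hM : p.2 = 'M'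
    · simp only [List.filter_cons, pvMjs, hM]
      simp [hnum, ih hno', List.map_map, Function.comp]
      intro a _; ring
    · have hop : ¬ (([p.2] : List Char) == ['M']) = true := by
        intro h; exact hM (by simpa using h)
      simp only [List.filter_cons, pvMjs, hM]
      simp [hnum, hop, ih hno', List.map_map, Function.comp]
      intro a _; ring

theorem pvChunk_ne (l : List (List Char × Char)) (hno : pvNoAl l) (k : Nat) (hk : k < l.length)
    (c : Char) (hc : PySem.Chars.isalpha c = true) : ((l.getD k ([], ' ')).1 == [c]) = false := by
  have hmem : l.getD k ([], ' ') ∈ l := by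
    rw [List.getD_eq_getElem l _ hk]; exact List.getElem_mem hk
  by_contra h
  have heq : (l.getD k ([], ' ')).1 = [c] := by
    have := Bool.not_eq_false _ |>.mp h; exact eq_of_beq this
  have := hno _ hmem c (by simp only [List.getD] at heq; simp [heq])
  rw [hc] at this; exact Bool.true_eq_false.mp this

theorem pvGetD_even' (l : List (List Char × Char)) (k : Nat) (hk : k < l.length) :
    PySem.List.pyGetD (pvFlat l) (2 * (k : Int)) [] = (l.getD k ([], ' ')).1 := by
  have : (2 * (k : Int)) = ((2 * k : Nat) : Int) := by push_cast; ring
  rw [this, PySem.List.pyGetD_natCast]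
  exact pvFlat_getD_even l k hk

theorem pvGetD_odd' (l : List (List Char × Char)) (k : Nat) (hk : k < l.length) :
    PySem.List.pyGetD (pvFlat l) (2 * (k : Int) + 1) [] = [(l.getD k ([], ' ')).2] := by
  have : (2 * (k : Int) + 1) = ((2 * k + 1 : Nat) : Int) := by push_cast; ring
  rw [this, PySem.List.pyGetD_natCast]
  exact pvFlat_getD_odd l k hk

-- one even step of the inner loop: i = 2k reads op_k and chunk_k

theorem pvInner_even_step (l : List (List Char × Char)) (k : Nat) (hk : k < l.length)
    (ac : Int × Int) :
    pvA_innerStep (pvFlat l) ac (2 * (k : Int))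
      = (ac.1 + (if pvIsN (l.getD k ([], ' ')).2 then pvVal (l.getD k ([], ' ')).1 else 0),
         ac.2 + (if pvIsS (l.getD k ([], ' ')).2 then pvVal (l.getD k ([], ' ')).1 else 0)) := by
  have hodd := pvGetD_odd' l k hk
  have heven := pvGetD_even' l k hk
  have e : ∀ a b : Char, (([a] : List Char) == [b]) = (a == b) := by
    intro a b; cases h : a == b <;> simp_all
  simp only [pvA_innerStep, hodd, heven, e, pvIsN, pvIsS, Prod.mk.injEq]
  constructor <;> split_ifs <;> simp_all [pvVal]

-- one odd step of the inner loop: i = 2k+1 reads chunk_{k+1}, a no-op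

theorem pvInner_odd_step (l : List (List Char × Char)) (hno : pvNoAl l) (k : Nat)
    (hk : k + 1 < l.length) (ac : Int × Int) :
    pvA_innerStep (pvFlat l) ac (2 * (k : Int) + 1) = ac := by
  have : (2 * (k : Int) + 1 + 1) = 2 * ((k + 1 : Nat) : Int) := by push_cast; ring
  simp only [pvA_innerStep, this, pvGetD_even' l (k + 1) hk]
  rw [pvChunk_ne l hno (k+1) hk 'M' (by decide), pvChunk_ne l hno (k+1) hk 'S' (by decide),
      pvChunk_ne l hno (k+1) hk 'H' (by decide), pvChunk_ne l hno (k+1) hk 'I' (by decide),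
      pvChunk_ne l hno (k+1) hk 'D' (by decide)]
  simp

theorem pvSumN_take_succ (l : List (List Char × Char)) (k : Nat) (hk : k < l.length) :
    pvSumN (l.take (k + 1))
      = pvSumN (l.take k) + (if pvIsN (l.getD k ([], ' ')).2 then pvVal (l.getD k ([], ' ')).1 else 0) := by
  rw [pvSumN, pvSumN, List.map_take, List.map_take,
      List.sum_take_succ _ k (by simpa using hk)]
  simp [List.getElem?_eq_getElem hk]

theorem pvSumS_take_succ (l : List (List Char × Char)) (k : Nat) (hk : k < l.length) :
    pvSumS (l.take (k + 1))
      = pvSumS (l.take k) + (if pvIsS (l.getD k ([], ' ')).2 then pvVal (l.getD k ([], ' ')).1 else 0) := by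
  rw [pvSumS, pvSumS, List.map_take, List.map_take,
      List.sum_take_succ _ k (by simpa using hk)]
  simp [List.getElem?_eq_getElem hk]

theorem pvInner_eq (l : List (List Char × Char)) (hno : pvNoAl l) :
    ∀ j : Nat, j < l.length → ∀ cn cs : Int,
    (PySem.List.pyRange 0 (2 * (j : Int) + 1) 1).foldl (pvA_innerStep (pvFlat l)) (cn, cs)
      = (cn + pvSumN (l.take (j + 1)), cs + pvSumS (l.take (j + 1))) := by
  intro j
  induction j with
  | zero =>
    intro hj cn cs
    rw [show (2 * ((0:Nat) : Int) + 1) = 1 by norm_num,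
        show PySem.List.pyRange 0 1 1 = [0] from by decide]
    rw [List.foldl_cons, List.foldl_nil,
        show (0 : Int) = 2 * ((0:Nat) : Int) by norm_num,
        pvInner_even_step l 0 hj (cn, cs)]
    rw [pvSumN_take_succ l 0 hj, pvSumS_take_succ l 0 hj]
    simp [pvSumN, pvSumS]
  | succ j ih =>
    intro hj cn cs
    have hjl : j < l.length := by omega
    rw [show (2 * ((j+1:Nat) : Int) + 1) = ((2 * (j : Int) + 1) + 1) + 1 by push_cast; ring,
        PySem.List.pyRange_one_succ_right (by positivity),
        PySem.List.pyRange_one_succ_right (by positivity),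
        List.foldl_append, List.foldl_append, ih hjl cn cs,
        List.foldl_cons, List.foldl_nil, List.foldl_cons, List.foldl_nil,
        pvInner_odd_step l hno j hj,
        show (2 * (j : Int) + 1 + 1) = 2 * ((j+1 : Nat) : Int) by push_cast; ring,
        pvInner_even_step l (j+1) hj,
        pvSumN_take_succ l (j+1) hj, pvSumS_take_succ l (j+1) hj]
    simp [add_assoc]

theorem pvOuter_eq (l : List (List Char × Char)) (hno : pvNoAl l) (js : List Nat)
    (hjs : ∀ j ∈ js, j < l.length ∧ (l.getD j ([], ' ')).2 = 'M') :
    ∀ l1 l2 l3 : List Int,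
    ((js.map (fun (j : Nat) => (0:Int) + 2 * (j : Int) + 1)).foldl (pvA_outerStep (pvFlat l))
        (0, 0, l1, l2, l3)).2.2
      = (l1 ++ js.map (fun (j : Nat) => pvSumN (l.take j)),
         l2 ++ js.map (fun (j : Nat) => pvSumS (l.take j)),
         l3 ++ js.map (fun (j : Nat) => pvVal (l.getD j ([], ' ')).1)) := by
  induction js with
  | nil => intro l1 l2 l3; simp
  | cons j js ihs =>
    intro l1 l2 l3
    obtain ⟨hjlen, hjM⟩ := hjs j List.mem_cons_self
    rw [List.map_cons, List.foldl_cons]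
    have hstep : pvA_outerStep (pvFlat l) (0, 0, l1, l2, l3) ((0:Int) + 2 * (j : Int) + 1)
        = (0, 0, l1 ++ [pvSumN (l.take j)], l2 ++ [pvSumS (l.take j)],
           l3 ++ [pvVal (l.getD j ([], ' ')).1]) := by
      simp only [pvA_outerStep]
      rw [show ((0:Int) + 2 * (j : Int) + 1 - 1) = 2 * (j : Int) by ring,
          show ((0:Int) + 2 * (j : Int) + 1) = 2 * (j : Int) + 1 by ring,
          pvGetD_even' l j hjlen]
      rw [pvInner_eq l hno j hjlen 0 0,
          pvSumN_take_succ l j hjlen, pvSumS_take_succ l j hjlen, hjM]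
      simp [pvIsN, pvIsS, pvVal]
    rw [hstep, ihs (fun q hq => hjs q (List.mem_cons_of_mem _ hq))]
    simp

theorem pvSpec_char (l : List (List Char × Char)) : ∀ cn cs : Int,
    pvSpec l cn cs = ((pvMjs l).map (fun (j : Nat) => cn + pvSumN (l.take j)),
                      (pvMjs l).map (fun (j : Nat) => cs + pvSumS (l.take j)),
                      (pvMjs l).map (fun (j : Nat) => pvVal (l.getD j ([], ' ')).1)) := by
  induction l with
  | nil => intro cn cs; simp [pvSpec, pvMjs]
  | cons p rest ih =>
    intro cn cs
    obtain ⟨num, op⟩ := p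
    by_cases hM : op = 'M'
    · simp only [pvSpec, pvMjs, hM]
      rw [ih]
      simp [pvSumN, pvSumS, pvIsN, pvIsS, pvVal, List.map_map, Function.comp]
      constructor <;> · intro a _; ring
    · simp only [pvSpec, pvMjs, hM]
      rw [ih]
      simp [pvSumN, pvSumS, List.map_map, Function.comp]
      constructor <;> · intro a _; ring_nf; by_cases h2 : pvIsN op <;> by_cases h3 : pvIsS op <;> simp [h2, h3] <;> ring

theorem pvB_main_eq (l : List (List Char × Char)) : ∀ (cn cs : Int) (l1 l2 l3 : List Int),
    (l.foldl pvB_mainStep (cn, cs, l1, l2, l3)).2.2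
      = (l1 ++ (pvSpec l cn cs).1, l2 ++ (pvSpec l cn cs).2.1, l3 ++ (pvSpec l cn cs).2.2) := by
  induction l with
  | nil => intro cn cs l1 l2 l3; simp [pvSpec]
  | cons p rest ih =>
    intro cn cs l1 l2 l3
    obtain ⟨num, op⟩ := p
    simp only [List.foldl_cons]
    by_cases hM : op = 'M'
    · rw [show pvB_mainStep (cn, cs, l1, l2, l3) (num, op)
          = (cn + pvVal num, cs + pvVal num, l1 ++ [cn], l2 ++ [cs], l3 ++ [pvVal num]) from by
        simp [pvB_mainStep, hM, pvVal]]
      rw [ih]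
      simp [pvSpec, hM, pvIsN, pvIsS, pvVal]
    · by_cases hSHI : op = 'S' ∨ op = 'H' ∨ op = 'I'
      · rw [show pvB_mainStep (cn, cs, l1, l2, l3) (num, op)
            = (cn + pvVal num, cs, l1, l2, l3) from by
          rcases hSHI with h|h|h <;> simp [pvB_mainStep, h, pvVal]]
        rw [ih]
        have hN : pvIsN op = true := by rcases hSHI with h|h|h <;> simp [pvIsN, h]
        have hS : pvIsS op = false := by rcases hSHI with h|h|h <;> subst h <;> decide
        simp [pvSpec, hM, hN, hS]
      · by_cases hD : op = 'D'
        · rw [show pvB_mainStep (cn, cs, l1, l2, l3) (num, op)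
              = (cn, cs + pvVal num, l1, l2, l3) from by
            simp [pvB_mainStep, hD, pvVal]]
          rw [ih]
          have hN : pvIsN op = false := by subst hD; decide
          have hS : pvIsS op = true := by simp [pvIsS, hD]
          simp [pvSpec, hM, hN, hS]
        · rw [show pvB_mainStep (cn, cs, l1, l2, l3) (num, op) = (cn, cs, l1, l2, l3) from by
            push Not at hSHI
            simp [pvB_mainStep, hM, hD, hSHI.1, hSHI.2.1, hSHI.2.2]]
          rw [ih]
          have hN : pvIsN op = false := by
            push Not at hSHI; simp [pvIsN, hM, hSHI.1, hSHI.2.1, hSHI.2.2]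
          have hS : pvIsS op = false := by simp [pvIsS, hM, hD]
          simp [pvSpec, hM, hN, hS]

def pvLastAux : List (List Char × Char) → Int → Int → Int
  | [], _, a => a
  | p :: rest, s, a => pvLastAux rest (s + 1) (if p.2 == 'M' then s else a)

theorem pvB_last_eq (l : List (List Char × Char)) : ∀ s a : Int,
    (PySem.List.enumerate l s).foldl pvB_lastStep a = pvLastAux l s a := by
  induction l with
  | nil => intro s a; simp [PySem.List.enumerate_nil, pvLastAux]
  | cons p rest ih =>
    intro s a
    rw [PySem.List.enumerate_cons]
    simp only [List.foldl_cons, pvB_lastStep, pvLastAux]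
    rw [ih]

theorem pvLastAux_props (l : List (List Char × Char)) : ∀ s a : Int, a < s →
    (a ≤ pvLastAux l s a ∧ pvLastAux l s a < s + l.length ∧
     (pvLastAux l s a = a ∨ s ≤ pvLastAux l s a) ∧
     ∀ p ∈ l.drop (pvLastAux l s a - s + 1).toNat, p.2 ≠ 'M') := by
  induction l with
  | nil =>
    intro s a ha
    exact ⟨le_refl _, by simpa using ha, Or.inl rfl, by simp [pvLastAux]⟩
  | cons p rest ih =>
    intro s a ha
    by_cases hM : p.2 = 'M'
    · have hstep : pvLastAux (p :: rest) s a = pvLastAux rest (s + 1) s := by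
        simp [pvLastAux, hM]
      obtain ⟨h1, h2, h4, h3⟩ := ih (s + 1) s (by omega)
      rw [hstep]
      refine ⟨by omega, by simp; omega, by omega, ?_⟩
      have hpos : (pvLastAux rest (s+1) s - s + 1).toNat
          = (pvLastAux rest (s+1) s - (s+1) + 1).toNat + 1 := by omega
      rw [hpos]
      simpa using h3
    · have hstep : pvLastAux (p :: rest) s a = pvLastAux rest (s + 1) a := by
        simp [pvLastAux, hM]
      obtain ⟨h1, h2, h4, h3⟩ := ih (s + 1) a (by omega)
      rw [hstep]
      refine ⟨h1, by simp; omega, by omega, ?_⟩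
      by_cases hlt : pvLastAux rest (s + 1) a < s + 1
      · have hva : pvLastAux rest (s + 1) a = a := by omega
        have hv : (pvLastAux rest (s+1) a - s + 1).toNat = 0 := by omega
        have hv2 : (pvLastAux rest (s+1) a - (s+1) + 1).toNat = 0 := by omega
        rw [hv]
        intro q hq
        rcases List.mem_cons.1 hq with rfl | hq'
        · exact hM
        · exact h3 q (by rw [hv2]; simpa using hq')
      · have hpos : (pvLastAux rest (s+1) a - s + 1).toNat
            = (pvLastAux rest (s+1) a - (s+1) + 1).toNat + 1 := by omega
        rw [hpos]
        exact fun q hq => h3 q (by simpa using hq)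

theorem pvSpec_noM (l : List (List Char × Char)) (h : ∀ p ∈ l, p.2 ≠ 'M') :
    ∀ cn cs : Int, pvSpec l cn cs = ([], [], []) := by
  induction l with
  | nil => intro cn cs; simp [pvSpec]
  | cons p rest ih =>
    intro cn cs
    obtain ⟨num, op⟩ := p
    have hM : op ≠ 'M' := h (num, op) List.mem_cons_self
    simp only [pvSpec, if_neg hM]
    exact ih (fun q hq => h q (List.mem_cons_of_mem _ hq)) _ _

theorem pvSpec_take (l : List (List Char × Char)) : ∀ n : Nat, (∀ p ∈ l.drop n, p.2 ≠ 'M') →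
    ∀ cn cs : Int, pvSpec (l.take n) cn cs = pvSpec l cn cs := by
  induction l with
  | nil => intro n h cn cs; simp
  | cons p rest ih =>
    intro n h cn cs
    cases n with
    | zero => simp only [List.take_zero, List.drop_zero] at h ⊢
              rw [pvSpec_noM _ h, pvSpec]
    | succ n =>
      obtain ⟨num, op⟩ := p
      simp only [List.take_succ_cons, pvSpec]
      rw [ih n (by simpa using h)]

-- assembling the two sides
theorem pvA_closed (cigar : String) :
    get_match_num_revised cigar
      = ((pvMjs (pvTok cigar.toList [])).map
           (fun (j : Nat) => pvSumN ((pvTok cigar.toList []).take j)),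
         (pvMjs (pvTok cigar.toList [])).map
           (fun (j : Nat) => pvSumS ((pvTok cigar.toList []).take j)),
         (pvMjs (pvTok cigar.toList [])).map
           (fun (j : Nat) => pvVal ((pvTok cigar.toList []).getD j ([], ' ')).1)) := by
  have hno : pvNoAl (pvTok cigar.toList []) := pvTok_noAl _ [] (by simp)
  unfold get_match_num_revised
  dsimp only
  rw [pvA_tok_eq cigar.toList [] [], List.nil_append,
      pvIndices_eq _ hno 0,
      pvOuter_eq _ hno (pvMjs (pvTok cigar.toList [])) (pvMjs_lt _) [] [] []]
  simp

theorem pvB_closed (cigar : String) :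
    get_match_num_revised_alt cigar
      = ((pvMjs (pvTok cigar.toList [])).map
           (fun (j : Nat) => pvSumN ((pvTok cigar.toList []).take j)),
         (pvMjs (pvTok cigar.toList [])).map
           (fun (j : Nat) => pvSumS ((pvTok cigar.toList []).take j)),
         (pvMjs (pvTok cigar.toList [])).map
           (fun (j : Nat) => pvVal ((pvTok cigar.toList []).getD j ([], ' ')).1)) := by
  unfold get_match_num_revised_alt
  dsimp only
  rw [pvB_tok_eq cigar.toList [] [], List.nil_append, pvB_last_eq _ 0 (-1)]
  obtain ⟨h1, h2, h4, h3⟩ := pvLastAux_props (pvTok cigar.toList []) 0 (-1) (by norm_num)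
  rw [PySem.List.slice_to _ (by omega), pvB_main_eq _ 0 0 [] [] [],
      pvSpec_take _ _ (by simpa using h3) 0 0, pvSpec_char]
  simp

-- ===== VERDICT (by name: the statement is the Claim_ definition above) =====
theorem get_match_num_revised_spec : Claim_equal_get_match_num_revised := by
  intro cigar _ _
  unfold Spec_get_match_num_revised
  rw [pvA_closed, pvB_closed]
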